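-- pv_equiv track=rewrite | github.com/umarov90/ReFeaFi | misc/test_and_pick_candidates.py | find_distance_special
-- ===== SOURCE A (Python) =====
-- def find_distance_special(array, value):
--     best = 100000000000
--     for region in array:
--         if region[0] < value < region[1]:
--             return 0
--         else:
--             d = min(abs(region[0] - value), abs(region[1] - value))
--             if d < best:
--                 best = d
--     return best
-- ===== SOURCE B (Python) =====
-- def _lower(xs, pred):
--     # first index i with not pred(xs[i]), given pred true on a prefix of xs
--     lo, hi = 0, len(xs)
--     while lo < hi:
--         mid = (lo + hi) // 2
--         if pred(xs[mid]):
--             lo = mid + 1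
--         else:
--             hi = mid
--     return lo
--
-- def find_distance_special(array, value):
--     # Interval stabbing by sorting: sort intervals by start and take prefix maxima
--     # of the ends; value is strictly inside some interval iff among the intervals
--     # whose start is < value (a prefix, found by binary search) the max end > value.
--     pairs = sorted([(r[0], r[1]) for r in array], key=lambda p: p[0])
--     pm = []
--     m = None
--     for s, e in pairs:
--         if m is None or e > m:
--             m = e
--         pm.append(m)
--     lo = _lower(pairs, lambda p: p[0] < value)
--     if lo > 0 and pm[lo - 1] > value:
--         return 0
--     # nearest endpoint: binary search in the sorted endpoint multiset
--     es = sorted([x for r in array for x in (r[0], r[1])])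
--     j = _lower(es, lambda x: x <= value)
--     best = 100000000000
--     if j > 0:
--         best = min(best, value - es[j - 1])
--     if j < len(es):
--         best = min(best, es[j] - value)
--     return best
-- ===== Notes on version B (the rewrite author's own statement) =====
-- stated objective: alternative
-- what changed: A's single linear scan (early-return on containment, running minimum of endpoint distances) is replaced by sort-based interval stabbing: sort intervals by start with prefix maxima of ends and binary-search the containment test, and binary-search the sorted endpoint multiset for the nearest endpoint.
-- outside the precondition, e.g. on find_distance_special([[0, 2], [5]], 1): A returns 0, B raises IndexError
import Mathlib
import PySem

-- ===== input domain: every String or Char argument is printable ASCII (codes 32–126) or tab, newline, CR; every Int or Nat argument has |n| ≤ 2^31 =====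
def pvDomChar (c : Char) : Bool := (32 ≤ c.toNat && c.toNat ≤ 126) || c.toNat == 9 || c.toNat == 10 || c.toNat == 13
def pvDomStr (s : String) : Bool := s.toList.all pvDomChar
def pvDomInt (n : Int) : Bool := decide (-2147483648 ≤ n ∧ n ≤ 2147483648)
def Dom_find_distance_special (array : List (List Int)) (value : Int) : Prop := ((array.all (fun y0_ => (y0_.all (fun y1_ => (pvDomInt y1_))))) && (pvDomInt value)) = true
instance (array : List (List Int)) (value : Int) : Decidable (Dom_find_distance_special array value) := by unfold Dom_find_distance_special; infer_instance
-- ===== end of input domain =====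

-- B replaces A's single linear scan by sort-based interval stabbing: intervals sorted by
-- start with prefix maxima of ends + a binary search decide containment, and a binary
-- search in the sorted endpoint multiset finds the nearest endpoint (alternative, same task).
-- region[0]/region[1] are ported with pyGetD (exact under Pre_, which excludes regions shorter than 2).

-- ===== PORT A =====
-- the loop: carries the accumulator `best`, returns 0 early on containment
def fdsA_go (value : Int) : List (List Int) → Int → Int
  | [], best => best
  | region :: rest, best =>
    let a := PySem.List.pyGetD region 0 0
    let b := PySem.List.pyGetD region 1 0
    if a < value ∧ value < b then 0
    else
      let d := min |a - value| |b - value|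
      if d < best then fdsA_go value rest d else fdsA_go value rest best

def find_distance_special (array : List (List Int)) (value : Int) : Int :=
  fdsA_go value array 100000000000

-- ===== PORT B =====
-- _lower(xs, pred): the hand-written binary-search while-loop, on the index function
-- i ↦ pred(xs[i]) (indices stay in range, so getD is exact there)
-- the while-loop as structural recursion on the fuel hi - lo (a totality guard only:
-- the loop shrinks hi - lo by at least one per iteration)
def pvLowerGo (f : Nat → Bool) : Nat → Nat → Nat → Nat
  | 0, lo, _ => lo
  | fuel + 1, lo, hi =>
    if lo < hi then
      let mid := (lo + hi) / 2
      if f mid then pvLowerGo f fuel (mid + 1) hi else pvLowerGo f fuel lo mid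
    else lo

def pvLower (f : Nat → Bool) (lo hi : Nat) : Nat := pvLowerGo f (hi - lo) lo hi

-- the `for s, e in pairs` loop building the prefix-max list pm (m : Option Int is Python's None/m)
def fdsB_pm : List (Int × Int) → Option Int → List Int
  | [], _ => []
  | (_, e) :: rest, m =>
      let m' := match m with
        | none => e
        | some mv => if e > mv then e else mv
      m' :: fdsB_pm rest (some m')

def find_distance_special_alt (array : List (List Int)) (value : Int) : Int :=
  let pairs := PySem.List.sorted (array.map (fun r => (PySem.List.pyGetD r 0 0, PySem.List.pyGetD r 1 0))) (fun p => p.1) false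
  let pm := fdsB_pm pairs none
  let lo := pvLower (fun i => decide ((pairs.getD i (0, 0)).1 < value)) 0 pairs.length
  if 0 < lo ∧ value < pm.getD (lo - 1) 0 then 0
  else
    let es := PySem.List.sorted (array.flatMap (fun r => [PySem.List.pyGetD r 0 0, PySem.List.pyGetD r 1 0])) (fun x => x) false
    let j := pvLower (fun i => decide (es.getD i 0 ≤ value)) 0 es.length
    let best : Int := 100000000000
    let best := if 0 < j then min best (value - es.getD (j - 1) 0) else best
    let best := if j < es.length then min best (es.getD j 0 - value) else best
    best

-- ===== PRECONDITION & SPEC =====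
-- Pre_ excludes arrays containing a region with fewer than two elements: A raises IndexError on
-- those unless an earlier region already contains the value (an accident of A's scan order), and
-- B raises IndexError on all of them while building its pair list.
def Pre_find_distance_special (array : List (List Int)) (value : Int) : Prop :=
  ∀ region ∈ array, 2 ≤ region.length
instance (array : List (List Int)) (value : Int) : Decidable (Pre_find_distance_special array value) := by unfold Pre_find_distance_special; infer_instance

def pvWitness_find_distance_special : List (List Int) × Int := ([[0, 2], [5, 9]], 4)

def Spec_find_distance_special (array : List (List Int)) (value : Int) (out : Int) : Prop := out = find_distance_special_alt array value
instance (array : List (List Int)) (value : Int) (out : Int) : Decidable (Spec_find_distance_special array value out) := by unfold Spec_find_distance_special; infer_instance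

-- ===== CLAIM (what is proved, stated in full; the proofs are below) =====
def Claim_equal_find_distance_special : Prop := ∀ (array : List (List Int)) (value : Int), Dom_find_distance_special array value → Pre_find_distance_special array value → Spec_find_distance_special array value (find_distance_special array value)

-- ===== LEMMAS AND PROOFS =====

-- A's loop computes: 0 on containment, else the min-fold of the per-region distances over `best`
theorem fdsA_go_eq (value : Int) :
    ∀ (l : List (List Int)) (best : Int),
      fdsA_go value l best =
        if l.any (fun region =>
             decide (PySem.List.pyGetD region 0 0 < value ∧ value < PySem.List.pyGetD region 1 0))
        then 0
        else (l.map (fun region =>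
               min |PySem.List.pyGetD region 0 0 - value| |PySem.List.pyGetD region 1 0 - value|)).foldl
             min best := by
  intro l
  induction l with
  | nil => intro best; simp [fdsA_go]
  | cons r rest ih =>
    intro best
    simp only [fdsA_go, List.any_cons, List.map_cons, List.foldl_cons]
    by_cases h : PySem.List.pyGetD r 0 0 < value ∧ value < PySem.List.pyGetD r 1 0
    · simp [h]
    · have hd : (if min |PySem.List.pyGetD r 0 0 - value| |PySem.List.pyGetD r 1 0 - value| < best
          then fdsA_go value rest (min |PySem.List.pyGetD r 0 0 - value| |PySem.List.pyGetD r 1 0 - value|)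
          else fdsA_go value rest best)
          = fdsA_go value rest
              (min best (min |PySem.List.pyGetD r 0 0 - value| |PySem.List.pyGetD r 1 0 - value|)) := by
        split_ifs with hlt
        · congr 1; omega
        · congr 1; omega
      rw [if_neg h, hd, ih]
      simp [h]

-- binary-search spec: pvLower finds the end of the true-prefix of f on [lo, hi)
theorem pvLower_spec (f : Nat → Bool) (n : Nat)
    (hmono : ∀ i j, i ≤ j → j < n → f j = true → f i = true) :
    ∀ (k lo hi : Nat), hi ≤ n → hi - lo ≤ k → lo ≤ hi →
      lo ≤ pvLowerGo f k lo hi ∧ pvLowerGo f k lo hi ≤ hi ∧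
      (∀ i, lo ≤ i → i < pvLowerGo f k lo hi → f i = true) ∧
      (∀ j, pvLowerGo f k lo hi ≤ j → j < hi → f j = false) := by
  intro k
  induction k with
  | zero =>
    intro lo hi hn hk hle
    have : lo = hi := by omega
    subst this
    rw [pvLowerGo]
    exact ⟨le_refl _, le_refl _, fun i h1 h2 => absurd h2 (by omega), fun j h1 h2 => absurd h2 (by omega)⟩
  | succ k ih =>
    intro lo hi hn hk hle
    rw [pvLowerGo]
    by_cases h : lo < hi
    · simp only [h, if_true]
      set mid := (lo + hi) / 2 with hmid
      have hml : lo ≤ mid := by omega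
      have hmh : mid < hi := by omega
      cases hf : f mid with
      | true =>
        simp only [if_true]
        obtain ⟨h1, h2, h3, h4⟩ := ih (mid + 1) hi hn (by omega) (by omega)
        refine ⟨by omega, h2, ?_, h4⟩
        intro i hi1 hi2
        by_cases hile : i ≤ mid
        · exact hmono i mid hile (by omega) hf
        · exact h3 i (by omega) hi2
      | false =>
        simp only [Bool.false_eq_true, if_false]
        obtain ⟨h1, h2, h3, h4⟩ := ih lo mid (by omega) (by omega) (by omega)
        refine ⟨h1, by omega, h3, ?_⟩
        intro j hj1 hj2
        by_cases hjm : j < mid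
        · exact h4 j hj1 hjm
        · cases hq : f j with
          | false => rfl
          | true =>
            have := hmono mid j (by omega) (by omega) hq
            rw [this] at hf; exact absurd hf (by simp)
    · simp only [h, if_false]
      exact ⟨le_refl _, hle, fun i h1 h2 => absurd h2 (by omega), fun j h1 h2 => absurd h2 (by omega)⟩

-- the prefix-max list: pm[k] > v iff some end among the first k+1 pairs exceeds v
theorem fdsB_pm_some_gt (v : Int) :
    ∀ (l : List (Int × Int)) (mv : Int) (k : Nat), k < l.length →
      (v < (fdsB_pm l (some mv)).getD k 0 ↔ v < mv ∨ ∃ j ≤ k, v < (l.getD j (0, 0)).2) := by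
  intro l
  induction l with
  | nil => intro mv k hk; simp at hk
  | cons p rest ih =>
    intro mv k hk
    obtain ⟨s, e⟩ := p
    have hm' : (if e > mv then e else mv) = max mv e := by split_ifs <;> omega
    simp only [fdsB_pm, hm']
    cases k with
    | zero =>
      simp only [List.getD_cons_zero]
      rw [lt_max_iff]
      constructor
      · rintro (h | h)
        · exact Or.inl h
        · exact Or.inr ⟨0, le_refl 0, by simpa using h⟩
      · rintro (h | ⟨j, hj, hv⟩)
        · exact Or.inl h
        · have : j = 0 := by omega
          subst this
          exact Or.inr (by simpa using hv)
    | succ k =>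
      simp only [List.getD_cons_succ]
      rw [ih (max mv e) k (by simpa using hk), lt_max_iff]
      constructor
      · rintro ((h | h) | ⟨j, hj, hv⟩)
        · exact Or.inl h
        · exact Or.inr ⟨0, by omega, by simpa using h⟩
        · exact Or.inr ⟨j + 1, by omega, by simpa using hv⟩
      · rintro (h | ⟨j, hj, hv⟩)
        · exact Or.inl (Or.inl h)
        · cases j with
          | zero => exact Or.inl (Or.inr (by simpa using hv))
          | succ j => exact Or.inr ⟨j, by omega, by simpa using hv⟩

theorem fdsB_pm_none_gt (v : Int) :
    ∀ (l : List (Int × Int)) (k : Nat), k < l.length →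
      (v < (fdsB_pm l none).getD k 0 ↔ ∃ j ≤ k, v < (l.getD j (0, 0)).2) := by
  intro l k hk
  cases l with
  | nil => simp at hk
  | cons p rest =>
    obtain ⟨s, e⟩ := p
    simp only [fdsB_pm]
    cases k with
    | zero =>
      simp only [List.getD_cons_zero]
      constructor
      · intro h; exact ⟨0, le_refl 0, by simpa using h⟩
      · rintro ⟨j, hj, hv⟩
        have : j = 0 := by omega
        subst this
        simpa using hv
    | succ k =>
      simp only [List.getD_cons_succ]
      rw [fdsB_pm_some_gt v rest e k (by simpa using hk)]
      constructor
      · rintro (h | ⟨j, hj, hv⟩)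
        · exact ⟨0, by omega, by simpa using h⟩
        · exact ⟨j + 1, by omega, by simpa using hv⟩
      · rintro ⟨j, hj, hv⟩
        cases j with
        | zero => exact Or.inl (by simpa using hv)
        | succ j => exact Or.inr ⟨j, by omega, by simpa using hv⟩

-- containment test of B ↔ containment scan of A
theorem contain_iff (array : List (List Int)) (value : Int) (P : List (Int × Int))
    (hP : P = PySem.List.sorted (array.map (fun r => (PySem.List.pyGetD r 0 0, PySem.List.pyGetD r 1 0))) (fun p => p.1) false)
    (lo : Nat)
    (hlo : lo = pvLower (fun i => decide ((P.getD i (0, 0)).1 < value)) 0 P.length) :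
    ((0 < lo ∧ value < (fdsB_pm P none).getD (lo - 1) 0) ↔
      array.any (fun region =>
        decide (PySem.List.pyGetD region 0 0 < value ∧ value < PySem.List.pyGetD region 1 0)) = true) := by
  have hpair : P.Pairwise (fun a b => a.1 ≤ b.1) := by
    rw [hP]; exact PySem.List.sorted_pairwise _ _
  have hpg := List.pairwise_iff_getElem.mp hpair
  have hmono : ∀ i j, i ≤ j → j < P.length →
      (fun i => decide ((P.getD i (0, 0)).1 < value)) j = true →
      (fun i => decide ((P.getD i (0, 0)).1 < value)) i = true := by
    intro i j hij hj hfj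
    simp only [decide_eq_true_iff] at hfj ⊢
    have hil : i < P.length := by omega
    rw [List.getD_eq_getElem P (0,0) hj] at hfj
    rw [List.getD_eq_getElem P (0,0) hil]
    rcases Nat.eq_or_lt_of_le hij with heq | hlt
    · subst heq; exact hfj
    · have hle : P[i].1 ≤ P[j].1 := hpg i j hil hj hlt
      omega
  obtain ⟨_, h2, h3, h4⟩ := pvLower_spec _ P.length hmono P.length 0 P.length (le_refl _) (by omega) (by omega)
  have hplo : pvLower (fun i => decide ((P.getD i (0, 0)).1 < value)) 0 P.length
      = pvLowerGo (fun i => decide ((P.getD i (0, 0)).1 < value)) P.length 0 P.length := rfl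
  rw [← hplo] at h2 h3 h4
  rw [← hlo] at h2 h3 h4
  constructor
  · rintro ⟨hpos, hpm⟩
    have hk : lo - 1 < P.length := by omega
    obtain ⟨j, hj, hv⟩ := (fdsB_pm_none_gt value P (lo - 1) hk).mp hpm
    have hfj := h3 j (by omega) (by omega)
    simp only [decide_eq_true_iff] at hfj
    have hjlen : j < P.length := by omega
    rw [List.getD_eq_getElem P (0,0) hjlen] at hfj hv
    obtain ⟨x, hx, h1x, h2x⟩ : ∃ x ∈ P, x.1 < value ∧ value < x.2 :=
      ⟨P[j], List.getElem_mem _, hfj, hv⟩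
    rw [hP, PySem.List.mem_sorted] at hx
    obtain ⟨region, hreg, heq⟩ := List.mem_map.mp hx
    rw [List.any_eq_true]
    refine ⟨region, hreg, ?_⟩
    simp only [decide_eq_true_iff]
    rw [← heq] at h1x h2x
    exact ⟨h1x, h2x⟩
  · intro hany
    obtain ⟨region, hreg, hcond⟩ := List.any_eq_true.mp hany
    simp only [decide_eq_true_iff] at hcond
    have hmem : (PySem.List.pyGetD region 0 0, PySem.List.pyGetD region 1 0) ∈ P := by
      rw [hP, PySem.List.mem_sorted]
      exact List.mem_map.mpr ⟨region, hreg, rfl⟩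
    obtain ⟨i, hi, heq⟩ := List.mem_iff_getElem.mp hmem
    have hfi : decide ((P.getD i (0, 0)).1 < value) = true := by
      simp only [decide_eq_true_iff]
      rw [List.getD_eq_getElem P (0,0) hi, heq]
      exact hcond.1
    have hilo : i < lo := by
      by_contra hc
      have := h4 i (by omega) hi
      rw [hfi] at this
      exact absurd this (by simp)
    refine ⟨by omega, ?_⟩
    rw [fdsB_pm_none_gt value P (lo - 1) (by omega)]
    refine ⟨i, by omega, ?_⟩
    rw [List.getD_eq_getElem P (0,0) hi, heq]
    exact hcond.2

-- per-region min distances fold = flat endpoint distances fold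
theorem foldmin_flat (v : Int) :
    ∀ (arr : List (List Int)) (a : Int),
      (arr.map (fun r => min |PySem.List.pyGetD r 0 0 - v| |PySem.List.pyGetD r 1 0 - v|)).foldl min a
      = ((arr.flatMap (fun r => [PySem.List.pyGetD r 0 0, PySem.List.pyGetD r 1 0])).map (fun e => |e - v|)).foldl min a := by
  intro arr
  induction arr with
  | nil => intro a; rfl
  | cons r rest ih =>
    intro a
    simp only [List.map_cons, List.foldl_cons, List.flatMap_cons, List.map_append, List.foldl_append]
    rw [← ih]
    congr 1
    simp only [List.map_nil, List.foldl_nil]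
    exact (min_assoc a _ _).symm

-- the two binary-search candidates compute min(S, every endpoint distance) on a sorted list
theorem nearest_sorted (v S : Int) (es : List Int) (hp : es.Pairwise (· ≤ ·))
    (j : Nat) (hj : j = pvLower (fun i => decide (es.getD i 0 ≤ v)) 0 es.length) :
    (if j < es.length
       then min (if 0 < j then min S (v - es.getD (j - 1) 0) else S) (es.getD j 0 - v)
       else (if 0 < j then min S (v - es.getD (j - 1) 0) else S))
    = (es.map (fun e => |e - v|)).foldl min S := by
  have hpg := List.pairwise_iff_getElem.mp hp
  have hmono : ∀ i j, i ≤ j → j < es.length →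
      (fun i => decide (es.getD i 0 ≤ v)) j = true →
      (fun i => decide (es.getD i 0 ≤ v)) i = true := by
    intro i j hij hjl hfj
    simp only [decide_eq_true_iff] at hfj ⊢
    have hil : i < es.length := by omega
    rw [List.getD_eq_getElem es 0 hjl] at hfj
    rw [List.getD_eq_getElem es 0 hil]
    rcases Nat.eq_or_lt_of_le hij with heq | hlt
    · subst heq; exact hfj
    · have := hpg i j hil hjl hlt
      omega
  obtain ⟨_, h2, h3, h4⟩ := pvLower_spec _ es.length hmono es.length 0 es.length (le_refl _) (by omega) (by omega)
  have hpj : pvLower (fun i => decide (es.getD i 0 ≤ v)) 0 es.length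
      = pvLowerGo (fun i => decide (es.getD i 0 ≤ v)) es.length 0 es.length := rfl
  rw [← hpj] at h2 h3 h4
  rw [← hj] at h2 h3 h4
  have htrue : ∀ i, i < j → es.getD i 0 ≤ v := by
    intro i hi
    have := h3 i (by omega) hi
    simpa only [decide_eq_true_iff] using this
  have hfalse : ∀ i, j ≤ i → i < es.length → v < es.getD i 0 := by
    intro i hi hil
    have := h4 i hi hil
    simp only [decide_eq_false_iff_not] at this
    omega
  set best := (if j < es.length
       then min (if 0 < j then min S (v - es.getD (j - 1) 0) else S) (es.getD j 0 - v)
       else (if 0 < j then min S (v - es.getD (j - 1) 0) else S)) with hbest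
  have hbS : best ≤ S := by
    rw [hbest]; split_ifs
    · exact le_trans (min_le_left _ _) (min_le_left _ _)
    · exact le_trans (min_le_left _ _) (le_refl _)
    · exact min_le_left _ _
    · exact le_refl _
  apply le_antisymm
  · -- best ≤ foldl
    rcases PySem.List.foldl_min_mem (es.map (fun e => |e - v|)) S with hm | hm
    · rw [hm]; exact hbS
    · obtain ⟨e, he, heq⟩ := List.mem_map.mp hm
      obtain ⟨i, hil, rfl⟩ := List.mem_iff_getElem.mp he
      rw [← heq]
      by_cases hij : i < j
      · have h0j : 0 < j := by omega
        have hjm1 : j - 1 < es.length := by omega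
        have h1 : es[i] ≤ v := by
          have := htrue i hij; rwa [List.getD_eq_getElem es 0 hil] at this
        have h2' : es[i] ≤ es.getD (j - 1) 0 := by
          rw [List.getD_eq_getElem es 0 hjm1]
          rcases Nat.lt_or_ge i (j - 1) with hlt | hge
          · exact hpg i (j - 1) hil hjm1 hlt
          · have heqi : i = j - 1 := by omega
            subst heqi; exact le_refl _
        have habs : |es[i] - v| = v - es[i] := by
          rw [abs_of_nonpos (by omega)]; ring
        have hb1 : best ≤ min S (v - es.getD (j - 1) 0) := by
          rw [hbest]; simp only [h0j, if_true]
          split_ifs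
          · exact min_le_left _ _
          · exact le_refl _
        rw [habs]
        have : min S (v - es.getD (j - 1) 0) ≤ v - es.getD (j - 1) 0 := min_le_right _ _
        omega
      · have hjl : j < es.length := by omega
        have h1 : v < es[i] := by
          have := hfalse i (by omega) hil; rwa [List.getD_eq_getElem es 0 hil] at this
        have h2' : es.getD j 0 ≤ es[i] := by
          rw [List.getD_eq_getElem es 0 hjl]
          rcases Nat.lt_or_ge j i with hlt | hge
          · exact hpg j i hjl hil hlt
          · have heqi : j = i := by omega
            subst heqi; exact le_refl _
        have habs : |es[i] - v| = es[i] - v := abs_of_nonneg (by omega)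
        have hb1 : best ≤ es.getD j 0 - v := by
          rw [hbest]; simp only [hjl, if_true]; exact min_le_right _ _
        rw [habs]; omega
  · -- foldl ≤ best
    have hfS := (PySem.List.foldl_min_le (es.map (fun e => |e - v|)) S).1
    have hfAll := (PySem.List.foldl_min_le (es.map (fun e => |e - v|)) S).2
    have hcand1 : 0 < j → (es.map (fun e => |e - v|)).foldl min S ≤ v - es.getD (j - 1) 0 := by
      intro h0j
      have hjm1 : j - 1 < es.length := by omega
      have h1 : es.getD (j - 1) 0 ≤ v := htrue (j - 1) (by omega)
      have habs : |es[j - 1]'hjm1 - v| = v - es.getD (j - 1) 0 := by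
        rw [List.getD_eq_getElem es 0 hjm1] at h1 ⊢
        rw [abs_of_nonpos (by omega)]; ring
      have := hfAll _ (List.mem_map.mpr ⟨es[j - 1]'hjm1, List.getElem_mem _, rfl⟩)
      omega
    have hcand2 : j < es.length → (es.map (fun e => |e - v|)).foldl min S ≤ es.getD j 0 - v := by
      intro hjl
      have h1 : v < es.getD j 0 := hfalse j (le_refl _) hjl
      have habs : |es[j]'hjl - v| = es.getD j 0 - v := by
        rw [List.getD_eq_getElem es 0 hjl] at h1 ⊢
        rw [abs_of_nonneg (by omega)]
      have := hfAll _ (List.mem_map.mpr ⟨es[j]'hjl, List.getElem_mem _, rfl⟩)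
      omega
    rw [hbest]
    split_ifs with hb1 hb2 hb3
    · exact le_min (le_min hfS (hcand1 hb2)) (hcand2 hb1)
    · exact le_min hfS (hcand2 hb1)
    · exact le_min hfS (hcand1 hb3)
    · exact hfS

-- ===== VERDICT (by name: the statement is the Claim_ definition above) =====
theorem find_distance_special_spec : Claim_equal_find_distance_special := by
  intro array value _ _
  show find_distance_special array value = find_distance_special_alt array value
  unfold find_distance_special find_distance_special_alt
  rw [fdsA_go_eq]
  simp only []
  set P := PySem.List.sorted (array.map (fun r => (PySem.List.pyGetD r 0 0, PySem.List.pyGetD r 1 0))) (fun p => p.1) false with hP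
  set lo := pvLower (fun i => decide ((P.getD i (0, 0)).1 < value)) 0 P.length with hlo
  set es := PySem.List.sorted (array.flatMap (fun r => [PySem.List.pyGetD r 0 0, PySem.List.pyGetD r 1 0])) (fun x => x) false with hes
  set j := pvLower (fun i => decide (es.getD i 0 ≤ value)) 0 es.length with hj
  have hcont := contain_iff array value P hP lo hlo
  have hnear : (if j < es.length
       then min (if 0 < j then min (100000000000 : Int) (value - es.getD (j - 1) 0) else 100000000000) (es.getD j 0 - value)
       else (if 0 < j then min (100000000000 : Int) (value - es.getD (j - 1) 0) else 100000000000))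
      = (array.map (fun region =>
          min |PySem.List.pyGetD region 0 0 - value| |PySem.List.pyGetD region 1 0 - value|)).foldl min 100000000000 := by
    rw [foldmin_flat]
    have hperm : es.Perm (array.flatMap (fun r => [PySem.List.pyGetD r 0 0, PySem.List.pyGetD r 1 0])) := by
      rw [hes]; exact PySem.List.sorted_perm _ _ _
    have hfold : ((array.flatMap (fun r => [PySem.List.pyGetD r 0 0, PySem.List.pyGetD r 1 0])).map (fun e => |e - value|)).foldl min 100000000000
        = (es.map (fun e => |e - value|)).foldl min 100000000000 :=
      ((hperm.map (fun e => |e - value|)).foldl_eq 100000000000).symm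
    rw [hfold]
    have hpair : es.Pairwise (· ≤ ·) := by
      rw [hes]
      have := PySem.List.sorted_pairwise (array.flatMap (fun r => [PySem.List.pyGetD r 0 0, PySem.List.pyGetD r 1 0])) (fun x => x)
      exact this
    exact nearest_sorted value 100000000000 es hpair j hj
  by_cases hany : array.any (fun region =>
      decide (PySem.List.pyGetD region 0 0 < value ∧ value < PySem.List.pyGetD region 1 0)) = true
  · rw [if_pos hany, if_pos (hcont.mpr hany)]
  · rw [if_neg hany, if_neg (fun hc => hany (hcont.mp hc))]
    exact hnear.symm
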